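-- pv_equiv track=rewrite | github.com/Ahmed-Mohiuddin-Shah/MAZ-NAV | maz-nav-python/rover_controller.py | convertPathToRoverSteps
-- ===== SOURCE A (Python) =====
-- def convertPathToRoverSteps(path):
--     steps = []
--     currentDir = "right"
--     previousX = None
--     previousY = None
--
--     rotations = {
--         "left": {
--             "up": "right",
--             "down": "left"
--         },
--         "right": {
--             "up": "left",
--             "down": "right"
--         },
--         "up": {
--             "left": "left",
--             "right": "right"
--         },
--         "down": {
--             "left": "right",
--             "right": "left"
--         }
--     }
--
--     for x, y in path:
--         if previousX is None and previousY is None: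
--             previousX, previousY = x, y
--             continue
--
--         forwardDir = None
--
--         if x > previousX:
--             forwardDir = "right"
--         if x < previousX:
--             forwardDir = "left"
--         if y > previousY:
--             forwardDir = "down"
--         if y < previousY:
--             forwardDir = "up"
--
--         if forwardDir != currentDir:
--             steps.append(rotations[currentDir][forwardDir])
--             currentDir = forwardDir
--
--         steps.append("move")
--
--         previousX = x
--         previousY = y
--
--     return steps
-- ===== SOURCE B (Python) =====
-- def _dir_code(prev, cur):
--     # clockwise encoding: 0=right, 1=down, 2=left, 3=up-of-screen... actually 3=up
--     (px, py), (x, y) = prev, cur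
--     if y != py:
--         return 1 if y > py else 3
--     if x != px:
--         return 0 if x > px else 2
--     return None
--
--
-- def convertPathToRoverSteps(path):
--     # pass 1: one forward-direction code per consecutive pair of points
--     dirs = []
--     prev = None
--     for p in path:
--         if prev is not None:
--             dirs.append(_dir_code(prev, p))
--         prev = p
--     # pass 2: emit turns by clockwise-delta arithmetic, then a move per segment
--     TURN = {1: "right", 3: "left"}
--     steps = []
--     cur = 0  # facing "right"
--     for d in dirs:
--         delta = (d - cur) % 4
--         if delta:
--             steps.append(TURN[delta])
--             cur = d
--         steps.append("move")
--     return steps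
-- ===== Notes on version B (the rewrite author's own statement) =====
-- stated objective: alternative
-- what changed: B splits A's single stateful loop into two passes (extract per-segment direction codes, then emit commands) and replaces the nested rotations dict by clockwise-delta modular arithmetic ((d - cur) % 4 -> turn).
import Mathlib
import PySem

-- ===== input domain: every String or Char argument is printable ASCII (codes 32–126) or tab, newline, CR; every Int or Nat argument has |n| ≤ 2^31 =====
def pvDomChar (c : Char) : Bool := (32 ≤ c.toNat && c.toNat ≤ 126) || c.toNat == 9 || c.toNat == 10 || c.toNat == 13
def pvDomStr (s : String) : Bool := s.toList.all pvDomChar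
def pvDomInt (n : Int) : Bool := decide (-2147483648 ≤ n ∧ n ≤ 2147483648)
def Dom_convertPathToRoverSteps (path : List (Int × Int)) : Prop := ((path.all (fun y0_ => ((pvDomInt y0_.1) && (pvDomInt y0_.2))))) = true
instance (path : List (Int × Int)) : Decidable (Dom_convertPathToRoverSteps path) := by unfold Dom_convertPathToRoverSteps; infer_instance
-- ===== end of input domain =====

-- B is an alternative decomposition of A: two passes (direction codes, then command emission)
-- with modular turn arithmetic instead of A's nested rotations dict; equal return values on Pre_.

-- ===== PORT A =====
def pvRotations : PySem.Dict String (PySem.Dict String String) :=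
  PySem.Dict.ofList [
    ("left",  PySem.Dict.ofList [("up", "right"), ("down", "left")]),
    ("right", PySem.Dict.ofList [("up", "left"), ("down", "right")]),
    ("up",    PySem.Dict.ofList [("left", "left"), ("right", "right")]),
    ("down",  PySem.Dict.ofList [("left", "right"), ("right", "left")])]

-- one iteration of A's loop; state = (steps, currentDir, previousX, previousY)
def pvAStep (st : List String × String × Option Int × Option Int) (pt : Int × Int) :
    List String × String × Option Int × Option Int :=
  let (steps, currentDir, previousX, previousY) := st
  let (x, y) := pt
  match previousX, previousY with
  | none, none => (steps, currentDir, some x, some y)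
  | some px, some py =>
    let forwardDir : Option String :=
      if y < py then some "up"
      else if y > py then some "down"
      else if x < px then some "left"
      else if x > px then some "right"
      else none
    let (steps, currentDir) :=
      if forwardDir ≠ some currentDir then
        -- rotations[currentDir][forwardDir]; KeyError (excluded by Pre_) modelled as none → ""
        let turn : Option String := (pvRotations.get? currentDir).bind (fun m =>
          match forwardDir with
          | some fd => m.get? fd
          | none => none)
        (steps ++ [turn.getD ""], forwardDir.getD currentDir)
      else (steps, currentDir)
    (steps ++ ["move"], currentDir, some x, some y)
  | _, _ => st  -- previousX/previousY are set together: unreachable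

def convertPathToRoverSteps (path : List (Int × Int)) : List String :=
  (path.foldl pvAStep ([], "right", none, none)).1

-- ===== PORT B =====
-- clockwise direction codes: 0 = right, 1 = down, 2 = left, 3 = up
def pvDirCode (prev cur : Int × Int) : Option Int :=
  if cur.2 ≠ prev.2 then some (if cur.2 > prev.2 then 1 else 3)
  else if cur.1 ≠ prev.1 then some (if cur.1 > prev.1 then 0 else 2)
  else none

def pvTurn : PySem.Dict Int String := PySem.Dict.ofList [(1, "right"), (3, "left")]

-- one iteration of B's second pass; state = (steps, cur)
def pvBStep (st : List String × Int) (d : Option Int) : List String × Int :=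
  let (steps, cur) := st
  match d with
  | some dv =>
    let delta := PySem.Int.mod (dv - cur) 4
    let (steps, cur) :=
      if delta ≠ 0 then (steps ++ [(pvTurn.get? delta).getD ""], dv) else (steps, cur)
    (steps ++ ["move"], cur)
  | none => (steps ++ ["move"], cur)  -- Python raises TypeError here (excluded by Pre_)

def convertPathToRoverSteps_alt (path : List (Int × Int)) : List String :=
  let dirs := (path.foldl (fun (acc : List (Option Int) × Option (Int × Int)) p =>
      match acc.2 with
      | some prev => (acc.1 ++ [pvDirCode prev p], some p)
      | none => (acc.1, some p)) ([], none)).1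
  (dirs.foldl pvBStep ([], 0)).1

-- ===== PRECONDITION & SPEC =====
-- the forward-direction code of each consecutive pair of path points
def pvSegDirs (path : List (Int × Int)) : List (Option Int) :=
  (path.zip path.tail).map (fun pq => pvDirCode pq.1 pq.2)

-- "b is not the 180° reversal of a" (vacuously true if either segment is degenerate)
def pvNoRev (a b : Option Int) : Bool :=
  match a, b with
  | some av, some bv => PySem.Int.mod (bv - av) 4 ≠ 2
  | _, _ => true

-- every adjacent pair of the list satisfies pvNoRev
def pvChainOk : List (Option Int) → Bool
  | a :: b :: rest => pvNoRev a b && pvChainOk (b :: rest)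
  | _ => true

-- Pre_ excludes exactly the inputs on which A raises KeyError: a repeated consecutive point
-- (rotations[currentDir][None]) or a 180° direction reversal (missing rotations entry).
def Pre_convertPathToRoverSteps (path : List (Int × Int)) : Prop :=
  ((pvSegDirs path).all Option.isSome = true) ∧
  (pvChainOk (some 0 :: pvSegDirs path) = true)

instance (path : List (Int × Int)) : Decidable (Pre_convertPathToRoverSteps path) := by
  unfold Pre_convertPathToRoverSteps; infer_instance

def pvWitness_convertPathToRoverSteps : (List (Int × Int)) := [(0, 0), (1, 0), (1, 1), (0, 1)]

def Spec_convertPathToRoverSteps (path : List (Int × Int)) (out : List String) : Prop := out = convertPathToRoverSteps_alt path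
instance (path : List (Int × Int)) (out : List String) : Decidable (Spec_convertPathToRoverSteps path out) := by unfold Spec_convertPathToRoverSteps; infer_instance

-- ===== CLAIM (what is proved, stated in full; the proofs are below) =====
def Claim_equal_convertPathToRoverSteps : Prop := ∀ (path : List (Int × Int)), Dom_convertPathToRoverSteps path → Pre_convertPathToRoverSteps path → Spec_convertPathToRoverSteps path (convertPathToRoverSteps path)

-- ===== LEMMAS AND PROOFS =====

-- the direction name A uses for B's code
def pvName (c : Int) : String :=
  if c = 0 then "right" else if c = 1 then "down" else if c = 2 then "left" else "up"

-- proof-only helper: the direction codes of the segments of `rest` walked from `prev`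
def pvDirsAux (prev : Int × Int) : List (Int × Int) → List (Option Int)
  | [] => []
  | q :: r => pvDirCode prev q :: pvDirsAux q r

theorem segDirs_cons (p : Int × Int) (rest : List (Int × Int)) :
    pvSegDirs (p :: rest) = pvDirsAux p rest := by
  induction rest generalizing p with
  | nil => rfl
  | cons q r ih => simp only [pvSegDirs, pvDirsAux] at *; simpa [pvSegDirs] using ih q

theorem pass1_eq (rest : List (Int × Int)) (acc : List (Option Int)) (prev : Int × Int) :
    (rest.foldl (fun (acc : List (Option Int) × Option (Int × Int)) p =>
      match acc.2 with
      | some prev => (acc.1 ++ [pvDirCode prev p], some p)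
      | none => (acc.1, some p)) (acc, some prev)).1 = acc ++ pvDirsAux prev rest := by
  induction rest generalizing acc prev with
  | nil => simp [pvDirsAux]
  | cons q r ih => simp [pvDirsAux, ih]

-- A's cascaded ifs compute the named version of B's direction code
theorem fwd_eq (px py x y : Int) :
    (if y < py then some "up"
     else if y > py then some "down"
     else if x < px then some "left"
     else if x > px then some "right"
     else (none : Option String)) =
    (pvDirCode (px, py) (x, y)).map pvName := by
  simp only [pvDirCode]
  rcases lt_trichotomy y py with h | h | h <;>
    rcases lt_trichotomy x px with h2 | h2 | h2 <;>
      simp_all [ne_of_lt, ne_of_gt, lt_asymm] <;> decide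

theorem dirCode_range (prev q : Int × Int) (dv : Int) (h : pvDirCode prev q = some dv) :
    dv = 0 ∨ dv = 1 ∨ dv = 2 ∨ dv = 3 := by
  unfold pvDirCode at h
  split_ifs at h <;> simp_all

theorem name_inj (c d : Int) (hc : c = 0 ∨ c = 1 ∨ c = 2 ∨ c = 3)
    (hd : d = 0 ∨ d = 1 ∨ d = 2 ∨ d = 3) : pvName d = pvName c ↔ d = c := by
  rcases hc with rfl | rfl | rfl | rfl <;> rcases hd with rfl | rfl | rfl | rfl <;> decide

theorem delta_zero (c d : Int) (hc : c = 0 ∨ c = 1 ∨ c = 2 ∨ c = 3)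
    (hd : d = 0 ∨ d = 1 ∨ d = 2 ∨ d = 3) : PySem.Int.mod (d - c) 4 = 0 ↔ d = c := by
  rcases hc with rfl | rfl | rfl | rfl <;> rcases hd with rfl | rfl | rfl | rfl <;> decide

-- A's rotations-dict lookup equals B's modular turn lookup on every legal transition
theorem rot_eq (c d : Int) (hc : c = 0 ∨ c = 1 ∨ c = 2 ∨ c = 3)
    (hd : d = 0 ∨ d = 1 ∨ d = 2 ∨ d = 3) (hne : d ≠ c)
    (hrev : PySem.Int.mod (d - c) 4 ≠ 2) :
    ((pvRotations.get? (pvName c)).bind (fun m => m.get? (pvName d))).getD "" =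
      (pvTurn.get? (PySem.Int.mod (d - c) 4)).getD "" := by
  rcases hc with rfl | rfl | rfl | rfl <;> rcases hd with rfl | rfl | rfl | rfl <;>
    first
      | exact absurd rfl hne
      | exact absurd (by decide) hrev
      | decide

-- the main loop invariant: A's remaining loop equals B's pass 2 over the remaining codes
theorem loop_eq (rest : List (Int × Int)) (steps : List String) (curI : Int) (prev : Int × Int)
    (hcur : curI = 0 ∨ curI = 1 ∨ curI = 2 ∨ curI = 3)
    (hsome : ∀ d ∈ pvDirsAux prev rest, d.isSome)
    (hchain : pvChainOk (some curI :: pvDirsAux prev rest) = true) :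
    (rest.foldl pvAStep (steps, pvName curI, some prev.1, some prev.2)).1 =
    ((pvDirsAux prev rest).foldl pvBStep (steps, curI)).1 := by
  induction rest generalizing steps curI prev with
  | nil => rfl
  | cons q r ih =>
    obtain ⟨dv, hdv⟩ : ∃ dv, pvDirCode prev q = some dv := by
      have := hsome (pvDirCode prev q) (by simp [pvDirsAux])
      cases h : pvDirCode prev q <;> simp [h] at this ⊢
    have hdvset := dirCode_range prev q dv hdv
    rw [pvDirsAux, hdv] at hchain
    rw [show pvChainOk (some curI :: some dv :: pvDirsAux q r) =
        (pvNoRev (some curI) (some dv) && pvChainOk (some dv :: pvDirsAux q r)) from rfl,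
      Bool.and_eq_true] at hchain
    have hnorev : PySem.Int.mod (dv - curI) 4 ≠ 2 := by
      have := hchain.1
      simpa [pvNoRev] using this
    have hchain' : pvChainOk (some dv :: pvDirsAux q r) = true := hchain.2
    have hsome' : ∀ d ∈ pvDirsAux q r, d.isSome := by
      intro d hdmem; exact hsome d (by simp [pvDirsAux, hdmem])
    have hfwd : (if q.2 < prev.2 then some "up"
        else if q.2 > prev.2 then some "down"
        else if q.1 < prev.1 then some "left"
        else if q.1 > prev.1 then some "right"
        else (none : Option String)) = some (pvName dv) := by
      rw [fwd_eq prev.1 prev.2 q.1 q.2]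
      simp [hdv]
    simp only [pvDirsAux, hdv, List.foldl_cons]
    by_cases heq : dv = curI
    · subst heq
      have hA : pvAStep (steps, pvName dv, some prev.1, some prev.2) q =
          (steps ++ ["move"], pvName dv, some q.1, some q.2) := by
        show pvAStep _ (q.1, q.2) = _
        simp only [pvAStep, hfwd]
        simp
      have hB : pvBStep (steps, dv) (some dv) = (steps ++ ["move"], dv) := by
        simp [pvBStep, sub_self, PySem.Int.mod]
      rw [hA, hB]
      have := ih (steps ++ ["move"]) dv q hdvset hsome' hchain'
      simpa using this
    · have hδ : PySem.Int.mod (dv - curI) 4 ≠ 0 := by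
        intro h0
        exact heq ((delta_zero curI dv hcur hdvset).mp h0)
      have hA : pvAStep (steps, pvName curI, some prev.1, some prev.2) q =
          ((steps ++ [(pvTurn.get? (PySem.Int.mod (dv - curI) 4)).getD ""]) ++ ["move"],
            pvName dv, some q.1, some q.2) := by
        show pvAStep _ (q.1, q.2) = _
        simp only [pvAStep, hfwd]
        have hne : pvName dv ≠ pvName curI := fun h =>
          heq ((name_inj curI dv hcur hdvset).mp h)
        rw [if_pos (by simpa using hne)]
        rw [rot_eq curI dv hcur hdvset heq hnorev]
        simp
      have hB : pvBStep (steps, curI) (some dv) =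
          ((steps ++ [(pvTurn.get? (PySem.Int.mod (dv - curI) 4)).getD ""]) ++ ["move"], dv) := by
        simp only [pvBStep]
        rw [if_pos hδ]
      rw [hA, hB]
      have := ih ((steps ++ [(pvTurn.get? (PySem.Int.mod (dv - curI) 4)).getD ""]) ++ ["move"])
        dv q hdvset hsome' hchain'
      simpa using this

-- ===== VERDICT (by name: the statement is the Claim_ definition above) =====
theorem convertPathToRoverSteps_spec : Claim_equal_convertPathToRoverSteps := by
  intro path _hdom hpre
  unfold Spec_convertPathToRoverSteps convertPathToRoverSteps convertPathToRoverSteps_alt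
  cases path with
  | nil => rfl
  | cons p rest =>
    obtain ⟨hsome, hchain⟩ := hpre
    rw [segDirs_cons] at hsome hchain
    have hdirs : (List.foldl (fun (acc : List (Option Int) × Option (Int × Int)) p =>
        match acc.2 with
        | some prev => (acc.1 ++ [pvDirCode prev p], some p)
        | none => (acc.1, some p)) ([], none) (p :: rest)).1 = pvDirsAux p rest := by
      rw [List.foldl_cons]
      show (List.foldl _ (([] : List (Option Int)), some p) rest).1 = pvDirsAux p rest
      simpa using pass1_eq rest [] p
    rw [hdirs, List.foldl_cons,
      show pvAStep ([], "right", none, none) p = ([], "right", some p.1, some p.2) from rfl]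
    have := loop_eq rest [] 0 p (Or.inl rfl) (by
      intro d hdmem
      simpa using List.all_eq_true.mp hsome d hdmem) hchain
    simpa [pvName] using this
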